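-- pv_equiv track=rewrite | github.com/navinislam/workout-ai-agent | convert_sbs_to_workout_format.py | determine_muscle_groups
-- ===== SOURCE A (Python) =====
-- from typing import Dict, List, Any
--
-- def determine_muscle_groups(exercises: List[Dict]) -> str:
--     """Determine muscle groups based on exercise names."""
--
--     exercise_names = [ex['name'].lower() for ex in exercises]
--     muscle_groups = []
--
--     # Check for specific muscle groups
--     if any('squat' in name or 'leg press' in name or 'lunge' in name for name in exercise_names):
--         muscle_groups.append('Legs')
--
--     if any('bench' in name or 'press' in name and 'leg' not in name for name in exercise_names):
--         muscle_groups.append('Chest')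
--
--     if any('row' in name or 'pull' in name or 'deadlift' in name for name in exercise_names):
--         muscle_groups.append('Back')
--
--     if any('curl' in name for name in exercise_names):
--         muscle_groups.append('Biceps')
--
--     if any('extension' in name or 'press' in name for name in exercise_names):
--         if 'tricep' in ' '.join(exercise_names) or 'overhead' in ' '.join(exercise_names):
--             muscle_groups.append('Triceps')
--
--     if any('shoulder' in name or 'lateral' in name or 'overhead' in name for name in exercise_names):
--         muscle_groups.append('Shoulders')
--
--     # Default groupings
--     if not muscle_groups:
--         muscle_groups = ['Full Body']
--
--     return ' & '.join(muscle_groups)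
-- ===== SOURCE B (Python) =====
-- def determine_muscle_groups(exercises):
--     """Determine muscle groups based on exercise names (single pass, boolean flags)."""
--     legs = chest = back = biceps = ext_or_press = tri_or_over = shoulders = False
--     for ex in exercises:
--         name = ex['name'].lower()
--         legs = legs or 'squat' in name or 'leg press' in name or 'lunge' in name
--         chest = chest or 'bench' in name or ('press' in name and 'leg' not in name)
--         back = back or 'row' in name or 'pull' in name or 'deadlift' in name
--         biceps = biceps or 'curl' in name
--         ext_or_press = ext_or_press or 'extension' in name or 'press' in name
--         tri_or_over = tri_or_over or 'tricep' in name or 'overhead' in name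
--         shoulders = shoulders or 'shoulder' in name or 'lateral' in name or 'overhead' in name
--     groups = [label for flag, label in (
--         (legs, 'Legs'), (chest, 'Chest'), (back, 'Back'), (biceps, 'Biceps'),
--         (ext_or_press and tri_or_over, 'Triceps'), (shoulders, 'Shoulders')) if flag]
--     return ' & '.join(groups) if groups else 'Full Body'
-- ===== Notes on version B (the rewrite author's own statement) =====
-- stated objective: alternative
-- what changed: Replaces A's six independent any(...) scans over the name list plus the ' '.join-ed string check by a single pass over the exercises that maintains seven boolean flags (the joined-string tricep/overhead test becomes a per-name flag, valid since those substrings contain no space), assembling the labels from the flags afterwards.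
import Mathlib
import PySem

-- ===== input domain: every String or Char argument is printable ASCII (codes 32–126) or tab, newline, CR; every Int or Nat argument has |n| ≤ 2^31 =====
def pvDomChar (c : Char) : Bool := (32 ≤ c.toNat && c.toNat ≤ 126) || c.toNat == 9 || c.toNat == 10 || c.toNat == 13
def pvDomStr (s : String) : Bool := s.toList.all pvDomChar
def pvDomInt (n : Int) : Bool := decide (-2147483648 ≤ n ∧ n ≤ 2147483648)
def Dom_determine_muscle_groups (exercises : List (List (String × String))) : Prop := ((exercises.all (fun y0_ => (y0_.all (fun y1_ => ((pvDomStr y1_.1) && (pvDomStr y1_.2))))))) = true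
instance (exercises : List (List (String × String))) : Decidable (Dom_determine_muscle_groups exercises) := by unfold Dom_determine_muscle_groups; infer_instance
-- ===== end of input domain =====

-- B replaces A's six independent `any(...)` scans and the big joined string by one pass over the
-- exercise names maintaining seven boolean flags (objective: alternative decomposition, same cost class).

-- shared accessor: ex['name'].lower() (both Pythons compute exactly this per exercise)
def pvNameOf (ex : List (String × String)) : String :=
  PySem.Str.lower (((PySem.Dict.mk ex).get? "name").getD "")

-- ===== PORT A =====
def determine_muscle_groups (exercises : List (List (String × String))) : String :=
  let exercise_names := exercises.map pvNameOf
  let mg0 : List String := []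
  let mg1 := if exercise_names.any (fun name => PySem.Str.isIn "squat" name || PySem.Str.isIn "leg press" name || PySem.Str.isIn "lunge" name) then mg0 ++ ["Legs"] else mg0
  let mg2 := if exercise_names.any (fun name => PySem.Str.isIn "bench" name || (PySem.Str.isIn "press" name && !PySem.Str.isIn "leg" name)) then mg1 ++ ["Chest"] else mg1
  let mg3 := if exercise_names.any (fun name => PySem.Str.isIn "row" name || PySem.Str.isIn "pull" name || PySem.Str.isIn "deadlift" name) then mg2 ++ ["Back"] else mg2
  let mg4 := if exercise_names.any (fun name => PySem.Str.isIn "curl" name) then mg3 ++ ["Biceps"] else mg3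
  let mg5 := if exercise_names.any (fun name => PySem.Str.isIn "extension" name || PySem.Str.isIn "press" name) then
      (if PySem.Str.isIn "tricep" (PySem.Str.join " " exercise_names) || PySem.Str.isIn "overhead" (PySem.Str.join " " exercise_names) then mg4 ++ ["Triceps"] else mg4)
    else mg4
  let mg6 := if exercise_names.any (fun name => PySem.Str.isIn "shoulder" name || PySem.Str.isIn "lateral" name || PySem.Str.isIn "overhead" name) then mg5 ++ ["Shoulders"] else mg5
  let mg7 := if mg6.isEmpty then ["Full Body"] else mg6
  PySem.Str.join " & " mg7

-- ===== PORT B =====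
-- one fold step of Source B's loop: OR the per-name tests into the seven flags
def pvAltStep (acc : Bool × Bool × Bool × Bool × Bool × Bool × Bool) (ex : List (String × String)) :
    Bool × Bool × Bool × Bool × Bool × Bool × Bool :=
  let name := pvNameOf ex
  (acc.1 || (PySem.Str.isIn "squat" name || PySem.Str.isIn "leg press" name || PySem.Str.isIn "lunge" name),
   acc.2.1 || (PySem.Str.isIn "bench" name || (PySem.Str.isIn "press" name && !PySem.Str.isIn "leg" name)),
   acc.2.2.1 || (PySem.Str.isIn "row" name || PySem.Str.isIn "pull" name || PySem.Str.isIn "deadlift" name),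
   acc.2.2.2.1 || PySem.Str.isIn "curl" name,
   acc.2.2.2.2.1 || (PySem.Str.isIn "extension" name || PySem.Str.isIn "press" name),
   acc.2.2.2.2.2.1 || (PySem.Str.isIn "tricep" name || PySem.Str.isIn "overhead" name),
   acc.2.2.2.2.2.2 || (PySem.Str.isIn "shoulder" name || PySem.Str.isIn "lateral" name || PySem.Str.isIn "overhead" name))

def determine_muscle_groups_alt (exercises : List (List (String × String))) : String :=
  let f := exercises.foldl pvAltStep (false, false, false, false, false, false, false)
  let groups :=
    (if f.1 then ["Legs"] else []) ++ (if f.2.1 then ["Chest"] else []) ++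
    (if f.2.2.1 then ["Back"] else []) ++ (if f.2.2.2.1 then ["Biceps"] else []) ++
    (if f.2.2.2.2.1 && f.2.2.2.2.2.1 then ["Triceps"] else []) ++
    (if f.2.2.2.2.2.2 then ["Shoulders"] else [])
  if groups.isEmpty then "Full Body" else PySem.Str.join " & " groups

-- ===== PRECONDITION & SPEC =====
-- Pre_ excludes exactly the inputs where A raises KeyError: an exercise dict without a 'name' key.
def Pre_determine_muscle_groups (exercises : List (List (String × String))) : Prop :=
  ∀ ex ∈ exercises, "name" ∈ ex.map Prod.fst
instance (exercises : List (List (String × String))) : Decidable (Pre_determine_muscle_groups exercises) := by unfold Pre_determine_muscle_groups; infer_instance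
def pvWitness_determine_muscle_groups : (List (List (String × String))) := [[("name", "Bench Press")], [("name", "Squat")]]

def Spec_determine_muscle_groups (exercises : List (List (String × String))) (out : String) : Prop := out = determine_muscle_groups_alt exercises
instance (exercises : List (List (String × String))) (out : String) : Decidable (Spec_determine_muscle_groups exercises out) := by unfold Spec_determine_muscle_groups; infer_instance

-- ===== CLAIM (what is proved, stated in full; the proofs are below) =====
def Claim_equal_determine_muscle_groups : Prop := ∀ (exercises : List (List (String × String))), Dom_determine_muscle_groups exercises → Pre_determine_muscle_groups exercises → Spec_determine_muscle_groups exercises (determine_muscle_groups exercises)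

-- ===== LEMMAS AND PROOFS =====

-- a prefix of `p ++ c :: t` avoiding c is a prefix of p
theorem pv_prefix_append_cons {α : Type} {sub p t : List α} {c : α}
    (h : sub <+: p ++ c :: t) (hc : c ∉ sub) : sub <+: p := by
  induction sub generalizing p with
  | nil => exact List.nil_prefix
  | cons x xs ih =>
    cases p with
    | nil =>
      rw [List.nil_append, List.cons_prefix_cons] at h
      exact absurd (h.1 ▸ List.mem_cons_self) hc
    | cons y p' =>
      rw [List.cons_append, List.cons_prefix_cons] at h
      exact h.1 ▸ (List.cons_prefix_cons).2 ⟨rfl, ih h.2 (fun hm => hc (List.mem_cons_of_mem _ hm))⟩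

-- an infix of `p ++ c :: t` avoiding c lies inside p or inside t
theorem pv_infix_append_cons {α : Type} {sub p t : List α} {c : α}
    (h : sub <:+: p ++ c :: t) (hc : c ∉ sub) : sub <:+: p ∨ sub <:+: t := by
  induction p with
  | nil =>
    rw [List.nil_append, List.infix_cons_iff] at h
    rcases h with h | h
    · cases sub with
      | nil => exact Or.inl (List.nil_infix)
      | cons x xs =>
        rw [List.cons_prefix_cons] at h
        exact absurd (h.1 ▸ List.mem_cons_self) hc
    · exact Or.inr h
  | cons a p' ih =>
    rw [List.cons_append, List.infix_cons_iff] at h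
    rcases h with h | h
    · have h2 : sub <+: (a :: p') ++ c :: t := by simpa using h
      exact Or.inl (pv_prefix_append_cons h2 hc).isInfix
    · rcases ih h with h' | h'
      · exact Or.inl (h'.trans (List.suffix_cons a p').isInfix)
      · exact Or.inr h'

-- a nonempty pattern without the separator char occurs in the intercalation iff in some part
theorem pv_infix_intercalate {sub : List Char} {c : Char}
    (hne : sub ≠ []) (hc : c ∉ sub) :
    ∀ parts : List (List Char), (sub <:+: PySem.Chars.join [c] parts ↔ ∃ p ∈ parts, sub <:+: p) := by
  intro parts
  induction parts with
  | nil => simp [PySem.Chars.join, List.intercalate, hne]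
  | cons p rest ih =>
    cases rest with
    | nil => simp [PySem.Chars.join, List.intercalate]
    | cons q rest' =>
      rw [PySem.Chars.join_cons_cons, List.append_assoc, List.singleton_append]
      constructor
      · intro h
        rcases pv_infix_append_cons h hc with h' | h'
        · exact ⟨p, List.mem_cons_self, h'⟩
        · rcases (ih.1 h') with ⟨r, hr, hsub⟩
          exact ⟨r, List.mem_cons_of_mem _ hr, hsub⟩
      · rintro ⟨r, hr, hsub⟩
        rcases List.mem_cons.1 hr with rfl | hr'
        · exact hsub.trans ((List.prefix_append r _).isInfix)
        · have h1 : sub <:+: PySem.Chars.join [c] (q :: rest') := ih.2 ⟨r, hr', hsub⟩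
          exact h1.trans (((List.suffix_cons c _).trans (List.suffix_append p _)).isInfix)

-- `sub in ' '.join(names)` for a nonempty space-free sub is `any(sub in n for n in names)`
theorem pv_isIn_join {sub : String} (hne : sub.toList ≠ []) (hc : ' ' ∉ sub.toList)
    (names : List String) :
    PySem.Str.isIn sub (PySem.Str.join " " names) = names.any (fun n => PySem.Str.isIn sub n) := by
  rw [Bool.eq_iff_iff]
  rw [PySem.Str.isIn_iff_infix, PySem.Str.toList_join, List.any_eq_true]
  have : (" " : String).toList = [' '] := rfl
  rw [this, pv_infix_intercalate hne hc]
  constructor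
  · rintro ⟨p, hp, hsub⟩
    rcases List.mem_map.1 hp with ⟨n, hn, rfl⟩
    exact ⟨n, hn, (PySem.Str.isIn_iff_infix sub n).2 hsub⟩
  · rintro ⟨n, hn, h⟩
    exact ⟨n.toList, List.mem_map_of_mem hn, (PySem.Str.isIn_iff_infix sub n).1 h⟩

-- Source B's loop computes, in each flag, the OR of its per-name test over all exercises
theorem pv_foldl_step (exs : List (List (String × String))) :
    ∀ a b c d e f g : Bool,
    exs.foldl pvAltStep (a, b, c, d, e, f, g) =
      (a || exs.any (fun ex => PySem.Str.isIn "squat" (pvNameOf ex) || PySem.Str.isIn "leg press" (pvNameOf ex) || PySem.Str.isIn "lunge" (pvNameOf ex)),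
       b || exs.any (fun ex => PySem.Str.isIn "bench" (pvNameOf ex) || (PySem.Str.isIn "press" (pvNameOf ex) && !PySem.Str.isIn "leg" (pvNameOf ex))),
       c || exs.any (fun ex => PySem.Str.isIn "row" (pvNameOf ex) || PySem.Str.isIn "pull" (pvNameOf ex) || PySem.Str.isIn "deadlift" (pvNameOf ex)),
       d || exs.any (fun ex => PySem.Str.isIn "curl" (pvNameOf ex)),
       e || exs.any (fun ex => PySem.Str.isIn "extension" (pvNameOf ex) || PySem.Str.isIn "press" (pvNameOf ex)),
       f || exs.any (fun ex => PySem.Str.isIn "tricep" (pvNameOf ex) || PySem.Str.isIn "overhead" (pvNameOf ex)),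
       g || exs.any (fun ex => PySem.Str.isIn "shoulder" (pvNameOf ex) || PySem.Str.isIn "lateral" (pvNameOf ex) || PySem.Str.isIn "overhead" (pvNameOf ex))) := by
  induction exs with
  | nil => simp
  | cons x xs ih =>
    intro a b c d e f g
    rw [List.foldl_cons, pvAltStep, ih]
    simp [List.any_cons, Bool.or_assoc]


-- OR distributes over `any` (used to split B's combined tricep/overhead flag)
theorem pv_any_or {α : Type} (l : List α) (p q : α → Bool) :
    (l.any fun x => p x || q x) = (l.any p || l.any q) := by
  induction l with
  | nil => rfl
  | cons x xs ih =>
    simp only [List.any_cons, ih]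
    cases p x <;> cases q x <;> cases xs.any p <;> cases xs.any q <;> rfl

-- the two assembly phases agree for any values of the eight boolean conditions
theorem pv_assemble (c1 c2 c3 c4 c5 c6 c7 c8 : Bool) :
    (PySem.Str.join " & "
      (if (if c8 then
              (if c5 then (if c6 || c7 then
                  (if c4 then (if c3 then (if c2 then (if c1 then ([] : List String) ++ ["Legs"] else []) ++ ["Chest"] else (if c1 then ([] : List String) ++ ["Legs"] else [])) ++ ["Back"] else (if c2 then (if c1 then ([] : List String) ++ ["Legs"] else []) ++ ["Chest"] else (if c1 then ([] : List String) ++ ["Legs"] else []))) ++ ["Biceps"] else (if c3 then (if c2 then (if c1 then ([] : List String) ++ ["Legs"] else []) ++ ["Chest"] else (if c1 then ([] : List String) ++ ["Legs"] else [])) ++ ["Back"] else (if c2 then (if c1 then ([] : List String) ++ ["Legs"] else []) ++ ["Chest"] else (if c1 then ([] : List String) ++ ["Legs"] else [])))) ++ ["Triceps"]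
                else
                  (if c4 then (if c3 then (if c2 then (if c1 then ([] : List String) ++ ["Legs"] else []) ++ ["Chest"] else (if c1 then ([] : List String) ++ ["Legs"] else [])) ++ ["Back"] else (if c2 then (if c1 then ([] : List String) ++ ["Legs"] else []) ++ ["Chest"] else (if c1 then ([] : List String) ++ ["Legs"] else []))) ++ ["Biceps"] else (if c3 then (if c2 then (if c1 then ([] : List String) ++ ["Legs"] else []) ++ ["Chest"] else (if c1 then ([] : List String) ++ ["Legs"] else [])) ++ ["Back"] else (if c2 then (if c1 then ([] : List String) ++ ["Legs"] else []) ++ ["Chest"] else (if c1 then ([] : List String) ++ ["Legs"] else [])))))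
               else
                  (if c4 then (if c3 then (if c2 then (if c1 then ([] : List String) ++ ["Legs"] else []) ++ ["Chest"] else (if c1 then ([] : List String) ++ ["Legs"] else [])) ++ ["Back"] else (if c2 then (if c1 then ([] : List String) ++ ["Legs"] else []) ++ ["Chest"] else (if c1 then ([] : List String) ++ ["Legs"] else []))) ++ ["Biceps"] else (if c3 then (if c2 then (if c1 then ([] : List String) ++ ["Legs"] else []) ++ ["Chest"] else (if c1 then ([] : List String) ++ ["Legs"] else [])) ++ ["Back"] else (if c2 then (if c1 then ([] : List String) ++ ["Legs"] else []) ++ ["Chest"] else (if c1 then ([] : List String) ++ ["Legs"] else []))))) ++ ["Shoulders"]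
            else
              (if c5 then (if c6 || c7 then
                  (if c4 then (if c3 then (if c2 then (if c1 then ([] : List String) ++ ["Legs"] else []) ++ ["Chest"] else (if c1 then ([] : List String) ++ ["Legs"] else [])) ++ ["Back"] else (if c2 then (if c1 then ([] : List String) ++ ["Legs"] else []) ++ ["Chest"] else (if c1 then ([] : List String) ++ ["Legs"] else []))) ++ ["Biceps"] else (if c3 then (if c2 then (if c1 then ([] : List String) ++ ["Legs"] else []) ++ ["Chest"] else (if c1 then ([] : List String) ++ ["Legs"] else [])) ++ ["Back"] else (if c2 then (if c1 then ([] : List String) ++ ["Legs"] else []) ++ ["Chest"] else (if c1 then ([] : List String) ++ ["Legs"] else [])))) ++ ["Triceps"]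
                else
                  (if c4 then (if c3 then (if c2 then (if c1 then ([] : List String) ++ ["Legs"] else []) ++ ["Chest"] else (if c1 then ([] : List String) ++ ["Legs"] else [])) ++ ["Back"] else (if c2 then (if c1 then ([] : List String) ++ ["Legs"] else []) ++ ["Chest"] else (if c1 then ([] : List String) ++ ["Legs"] else []))) ++ ["Biceps"] else (if c3 then (if c2 then (if c1 then ([] : List String) ++ ["Legs"] else []) ++ ["Chest"] else (if c1 then ([] : List String) ++ ["Legs"] else [])) ++ ["Back"] else (if c2 then (if c1 then ([] : List String) ++ ["Legs"] else []) ++ ["Chest"] else (if c1 then ([] : List String) ++ ["Legs"] else [])))))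
               else
                  (if c4 then (if c3 then (if c2 then (if c1 then ([] : List String) ++ ["Legs"] else []) ++ ["Chest"] else (if c1 then ([] : List String) ++ ["Legs"] else [])) ++ ["Back"] else (if c2 then (if c1 then ([] : List String) ++ ["Legs"] else []) ++ ["Chest"] else (if c1 then ([] : List String) ++ ["Legs"] else []))) ++ ["Biceps"] else (if c3 then (if c2 then (if c1 then ([] : List String) ++ ["Legs"] else []) ++ ["Chest"] else (if c1 then ([] : List String) ++ ["Legs"] else [])) ++ ["Back"] else (if c2 then (if c1 then ([] : List String) ++ ["Legs"] else []) ++ ["Chest"] else (if c1 then ([] : List String) ++ ["Legs"] else [])))))).isEmpty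
        then ["Full Body"]
        else (if c8 then
              (if c5 then (if c6 || c7 then
                  (if c4 then (if c3 then (if c2 then (if c1 then ([] : List String) ++ ["Legs"] else []) ++ ["Chest"] else (if c1 then ([] : List String) ++ ["Legs"] else [])) ++ ["Back"] else (if c2 then (if c1 then ([] : List String) ++ ["Legs"] else []) ++ ["Chest"] else (if c1 then ([] : List String) ++ ["Legs"] else []))) ++ ["Biceps"] else (if c3 then (if c2 then (if c1 then ([] : List String) ++ ["Legs"] else []) ++ ["Chest"] else (if c1 then ([] : List String) ++ ["Legs"] else [])) ++ ["Back"] else (if c2 then (if c1 then ([] : List String) ++ ["Legs"] else []) ++ ["Chest"] else (if c1 then ([] : List String) ++ ["Legs"] else [])))) ++ ["Triceps"]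
                else
                  (if c4 then (if c3 then (if c2 then (if c1 then ([] : List String) ++ ["Legs"] else []) ++ ["Chest"] else (if c1 then ([] : List String) ++ ["Legs"] else [])) ++ ["Back"] else (if c2 then (if c1 then ([] : List String) ++ ["Legs"] else []) ++ ["Chest"] else (if c1 then ([] : List String) ++ ["Legs"] else []))) ++ ["Biceps"] else (if c3 then (if c2 then (if c1 then ([] : List String) ++ ["Legs"] else []) ++ ["Chest"] else (if c1 then ([] : List String) ++ ["Legs"] else [])) ++ ["Back"] else (if c2 then (if c1 then ([] : List String) ++ ["Legs"] else []) ++ ["Chest"] else (if c1 then ([] : List String) ++ ["Legs"] else [])))))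
               else
                  (if c4 then (if c3 then (if c2 then (if c1 then ([] : List String) ++ ["Legs"] else []) ++ ["Chest"] else (if c1 then ([] : List String) ++ ["Legs"] else [])) ++ ["Back"] else (if c2 then (if c1 then ([] : List String) ++ ["Legs"] else []) ++ ["Chest"] else (if c1 then ([] : List String) ++ ["Legs"] else []))) ++ ["Biceps"] else (if c3 then (if c2 then (if c1 then ([] : List String) ++ ["Legs"] else []) ++ ["Chest"] else (if c1 then ([] : List String) ++ ["Legs"] else [])) ++ ["Back"] else (if c2 then (if c1 then ([] : List String) ++ ["Legs"] else []) ++ ["Chest"] else (if c1 then ([] : List String) ++ ["Legs"] else []))))) ++ ["Shoulders"]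
            else
              (if c5 then (if c6 || c7 then
                  (if c4 then (if c3 then (if c2 then (if c1 then ([] : List String) ++ ["Legs"] else []) ++ ["Chest"] else (if c1 then ([] : List String) ++ ["Legs"] else [])) ++ ["Back"] else (if c2 then (if c1 then ([] : List String) ++ ["Legs"] else []) ++ ["Chest"] else (if c1 then ([] : List String) ++ ["Legs"] else []))) ++ ["Biceps"] else (if c3 then (if c2 then (if c1 then ([] : List String) ++ ["Legs"] else []) ++ ["Chest"] else (if c1 then ([] : List String) ++ ["Legs"] else [])) ++ ["Back"] else (if c2 then (if c1 then ([] : List String) ++ ["Legs"] else []) ++ ["Chest"] else (if c1 then ([] : List String) ++ ["Legs"] else [])))) ++ ["Triceps"]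
                else
                  (if c4 then (if c3 then (if c2 then (if c1 then ([] : List String) ++ ["Legs"] else []) ++ ["Chest"] else (if c1 then ([] : List String) ++ ["Legs"] else [])) ++ ["Back"] else (if c2 then (if c1 then ([] : List String) ++ ["Legs"] else []) ++ ["Chest"] else (if c1 then ([] : List String) ++ ["Legs"] else []))) ++ ["Biceps"] else (if c3 then (if c2 then (if c1 then ([] : List String) ++ ["Legs"] else []) ++ ["Chest"] else (if c1 then ([] : List String) ++ ["Legs"] else [])) ++ ["Back"] else (if c2 then (if c1 then ([] : List String) ++ ["Legs"] else []) ++ ["Chest"] else (if c1 then ([] : List String) ++ ["Legs"] else [])))))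
               else
                  (if c4 then (if c3 then (if c2 then (if c1 then ([] : List String) ++ ["Legs"] else []) ++ ["Chest"] else (if c1 then ([] : List String) ++ ["Legs"] else [])) ++ ["Back"] else (if c2 then (if c1 then ([] : List String) ++ ["Legs"] else []) ++ ["Chest"] else (if c1 then ([] : List String) ++ ["Legs"] else []))) ++ ["Biceps"] else (if c3 then (if c2 then (if c1 then ([] : List String) ++ ["Legs"] else []) ++ ["Chest"] else (if c1 then ([] : List String) ++ ["Legs"] else [])) ++ ["Back"] else (if c2 then (if c1 then ([] : List String) ++ ["Legs"] else []) ++ ["Chest"] else (if c1 then ([] : List String) ++ ["Legs"] else []))))))))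
    =
    (if ((if c1 then ["Legs"] else []) ++ (if c2 then ["Chest"] else []) ++ (if c3 then ["Back"] else []) ++ (if c4 then ["Biceps"] else []) ++ (if c5 && (c6 || c7) then ["Triceps"] else []) ++ (if c8 then ["Shoulders"] else [])).isEmpty
      then "Full Body"
      else PySem.Str.join " & " ((if c1 then ["Legs"] else []) ++ (if c2 then ["Chest"] else []) ++ (if c3 then ["Back"] else []) ++ (if c4 then ["Biceps"] else []) ++ (if c5 && (c6 || c7) then ["Triceps"] else []) ++ (if c8 then ["Shoulders"] else []))) := by
  cases c1 <;> cases c2 <;> cases c3 <;> cases c4 <;> cases c5 <;> cases c6 <;> cases c7 <;> cases c8 <;> decide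

-- ===== VERDICT (by name: the statement is the Claim_ definition above) =====
theorem determine_muscle_groups_spec : Claim_equal_determine_muscle_groups := by
  intro exercises _ _
  unfold Spec_determine_muscle_groups
  simp only [determine_muscle_groups, determine_muscle_groups_alt]
  rw [pv_foldl_step]
  rw [pv_isIn_join (sub := "tricep") (by decide) (by decide) (exercises.map pvNameOf),
      pv_isIn_join (sub := "overhead") (by decide) (by decide) (exercises.map pvNameOf)]
  simp only [List.any_map, Function.comp_def, Bool.false_or,
    pv_any_or exercises (fun ex => PySem.Str.isIn "tricep" (pvNameOf ex)) (fun ex => PySem.Str.isIn "overhead" (pvNameOf ex))]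
  exact pv_assemble _ _ _ _ _ _ _ _
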